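-- pv_equiv track=rewrite | github.com/anupyadav27/threat-engine | compliance/oci/backup/analyze_resource_misalignment.py | extract_actual_resource_from_assertion
-- ===== SOURCE A (Python) =====
-- def extract_actual_resource_from_assertion(resource_assertion: str) -> str:
--     """Try to extract actual resource name from assertion-like resource"""
--     # Common patterns:
--     # lineage_security_database_cross_account -> database
--     # data_warehouse_security_endpoint_access -> endpoint
--     # compute_security_instance_public_ip -> instance
--
--     # Try to find resource keywords
--     resource_keywords = [
--         'database', 'instance', 'bucket', 'volume', 'cluster', 'table',
--         'endpoint', 'function', 'application', 'gateway', 'listener',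
--         'user', 'group', 'policy', 'key', 'secret', 'vault', 'alarm',
--         'log', 'rule', 'topic', 'queue', 'stream', 'zone', 'vcn',
--         'subnet', 'certificate', 'project', 'workspace', 'catalog',
--         'model', 'notebook', 'pipeline', 'stack', 'firewall'
--     ]
--
--     parts = resource_assertion.lower().split('_')
--     for keyword in resource_keywords:
--         if keyword in parts:
--             return keyword
--
--     return None
-- ===== SOURCE B (Python) =====
-- # Keyword -> priority rank, built once as a literal mapping (rank = position
-- # in A's priority list; smaller rank = higher priority).
-- _RANK = {
--     'database': 0, 'instance': 1, 'bucket': 2, 'volume': 3, 'cluster': 4,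
--     'table': 5, 'endpoint': 6, 'function': 7, 'application': 8,
--     'gateway': 9, 'listener': 10, 'user': 11, 'group': 12, 'policy': 13,
--     'key': 14, 'secret': 15, 'vault': 16, 'alarm': 17, 'log': 18,
--     'rule': 19, 'topic': 20, 'queue': 21, 'stream': 22, 'zone': 23,
--     'vcn': 24, 'subnet': 25, 'certificate': 26, 'project': 27,
--     'workspace': 28, 'catalog': 29, 'model': 30, 'notebook': 31,
--     'pipeline': 32, 'stack': 33, 'firewall': 34,
-- }
--
--
-- def extract_actual_resource_from_assertion(resource_assertion: str) -> str:
--     """Single pass over the underscore-split parts, keeping the keyword part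
--     of smallest priority rank (matches A's keyword-list priority order)."""
--     best = None  # (rank, keyword) of the best keyword seen so far
--     for part in resource_assertion.lower().split('_'):
--         r = _RANK.get(part)
--         if r is not None and (best is None or r < best[0]):
--             best = (r, part)
--     return best[1] if best is not None else None
-- ===== Notes on version B (the rewrite author's own statement) =====
-- stated objective: alternative
-- what changed: A scans the 35-keyword priority list and tests each keyword for membership in the parts list; B uses a literal keyword-to-rank dict and makes a single pass over the parts, keeping the (rank, keyword) pair with the smallest rank.
import Mathlib
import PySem

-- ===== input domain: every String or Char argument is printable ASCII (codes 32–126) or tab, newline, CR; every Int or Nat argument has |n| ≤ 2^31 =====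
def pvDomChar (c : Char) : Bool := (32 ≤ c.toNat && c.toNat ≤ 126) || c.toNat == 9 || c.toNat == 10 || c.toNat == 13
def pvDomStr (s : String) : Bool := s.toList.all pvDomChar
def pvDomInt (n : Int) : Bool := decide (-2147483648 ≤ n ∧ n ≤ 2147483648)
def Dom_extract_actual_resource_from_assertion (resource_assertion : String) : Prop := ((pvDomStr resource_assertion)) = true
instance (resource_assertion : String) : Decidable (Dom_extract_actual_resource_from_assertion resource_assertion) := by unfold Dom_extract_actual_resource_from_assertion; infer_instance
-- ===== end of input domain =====

-- B replaces A's scan over the keyword priority list (with an inner membership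
-- test over the parts) by one pass over the parts with a literal keyword→rank
-- dict, keeping the (rank, keyword) pair of smallest rank; same return value,
-- proved equivalent (different traversal, not claimed faster).

-- ===== PORT A =====
-- A's priority-ordered keyword list
def resourceKeywords : List String :=
  ["database", "instance", "bucket", "volume", "cluster", "table",
   "endpoint", "function", "application", "gateway", "listener",
   "user", "group", "policy", "key", "secret", "vault", "alarm",
   "log", "rule", "topic", "queue", "stream", "zone", "vcn",
   "subnet", "certificate", "project", "workspace", "catalog",
   "model", "notebook", "pipeline", "stack", "firewall"]

def extract_actual_resource_from_assertion (resource_assertion : String) : Option String :=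
  match PySem.Str.split? (PySem.Str.lower resource_assertion) "_" with
  | none => none  -- unreachable: the separator "_" is nonempty
  | some parts => resourceKeywords.find? (fun keyword => parts.contains keyword)

-- ===== PORT B =====
-- B's literal keyword→rank dict (_RANK in Source B)
def pvRank : PySem.Dict String Int :=
  PySem.Dict.ofList
    [("database", 0), ("instance", 1), ("bucket", 2), ("volume", 3),
     ("cluster", 4), ("table", 5), ("endpoint", 6), ("function", 7),
     ("application", 8), ("gateway", 9), ("listener", 10), ("user", 11),
     ("group", 12), ("policy", 13), ("key", 14), ("secret", 15),
     ("vault", 16), ("alarm", 17), ("log", 18), ("rule", 19),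
     ("topic", 20), ("queue", 21), ("stream", 22), ("zone", 23),
     ("vcn", 24), ("subnet", 25), ("certificate", 26), ("project", 27),
     ("workspace", 28), ("catalog", 29), ("model", 30), ("notebook", 31),
     ("pipeline", 32), ("stack", 33), ("firewall", 34)]

def extract_actual_resource_from_assertion_alt (resource_assertion : String) : Option String :=
  match PySem.Str.split? (PySem.Str.lower resource_assertion) "_" with
  | none => none  -- unreachable: the separator "_" is nonempty
  | some parts =>
    match parts.foldl
      (fun best part =>
        match pvRank.get? part with
        | some r =>
          match best with
          | none => some (r, part)
          | some b => if r < b.1 then some (r, part) else best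
        | none => best)
      (none : Option (Int × String)) with
    | some b => some b.2
    | none => none

-- ===== PRECONDITION & SPEC =====
def Spec_extract_actual_resource_from_assertion (resource_assertion : String) (out : Option String) : Prop := out = extract_actual_resource_from_assertion_alt resource_assertion
instance (resource_assertion : String) (out : Option String) : Decidable (Spec_extract_actual_resource_from_assertion resource_assertion out) := by unfold Spec_extract_actual_resource_from_assertion; infer_instance

-- ===== CLAIM (what is proved, stated in full; the proofs are below) =====
def Claim_equal_extract_actual_resource_from_assertion : Prop := ∀ (resource_assertion : String), Dom_extract_actual_resource_from_assertion resource_assertion → Spec_extract_actual_resource_from_assertion resource_assertion (extract_actual_resource_from_assertion resource_assertion)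

-- ===== LEMMAS AND PROOFS =====

theorem resourceKeywords_nodup : resourceKeywords.Nodup := by decide

-- B's literal dict is the dict built by inserting (keyword ↦ rank) along A's list
set_option maxRecDepth 20000 in
theorem pvRank_eq :
    pvRank = (PySem.List.enumerate resourceKeywords 0).foldl
      (fun d p => d.insert p.2 p.1) PySem.Dict.empty := by rfl

-- lookup in a dict built by inserting (value ↦ index) over an enumeration
theorem get?_enum_foldl (l : List String) (hl : l.Nodup) (p : String) :
    ∀ (s : Int) (d : PySem.Dict String Int),
      ((PySem.List.enumerate l s).foldl (fun d q => d.insert q.2 q.1) d).get? p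
        = if p ∈ l then some (s + (List.idxOf p l : Int)) else d.get? p := by
  induction l with
  | nil => intro s d; simp [PySem.List.enumerate]
  | cons k ks ih =>
    intro s d
    rw [PySem.List.enumerate_cons]
    simp only [List.foldl_cons]
    rw [ih (List.Nodup.of_cons hl) (s + 1)]
    by_cases hp : p ∈ ks
    · have hne : p ≠ k := fun h => (List.nodup_cons.mp hl).1 (h ▸ hp)
      rw [if_pos hp, if_pos (List.mem_cons_of_mem _ hp),
          List.idxOf_cons_ne _ (Ne.symm hne)]
      simp only [Nat.succ_eq_add_one]
      push_cast; ring_nf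
    · rw [if_neg hp]
      by_cases hk : p = k
      · subst hk
        rw [if_pos (List.mem_cons_self), List.idxOf_cons_self,
            PySem.Dict.get?_insert_self]
        simp
      · rw [if_neg (by simp [hk, hp]), PySem.Dict.get?_insert_of_ne _ _ hk]

theorem pvRank_get? (p : String) :
    pvRank.get? p
      = if p ∈ resourceKeywords
        then some ((List.idxOf p resourceKeywords : Int)) else none := by
  rw [pvRank_eq]
  have h := get?_enum_foldl resourceKeywords resourceKeywords_nodup p 0 PySem.Dict.empty
  simpa using h

-- the running minimum of keyword ranks over the parts
def pvMinFold (parts : List String) (n : Nat) : Nat :=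
  parts.foldl (fun n p => min n (List.idxOf p resourceKeywords)) n

theorem pvMinFold_le (parts : List String) : ∀ n, pvMinFold parts n ≤ n := by
  induction parts with
  | nil => intro n; simp [pvMinFold]
  | cons p ps ih =>
    intro n
    calc pvMinFold (p :: ps) n
        = pvMinFold ps (min n (List.idxOf p resourceKeywords)) := rfl
      _ ≤ min n (List.idxOf p resourceKeywords) := ih _
      _ ≤ n := Nat.min_le_left _ _

theorem pvMinFold_attained (parts : List String) :
    ∀ n, pvMinFold parts n = n ∨
      ∃ p ∈ parts, pvMinFold parts n = List.idxOf p resourceKeywords := by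
  induction parts with
  | nil => intro n; left; rfl
  | cons p ps ih =>
    intro n
    rcases ih (min n (List.idxOf p resourceKeywords)) with h | ⟨q, hq, hfq⟩
    · have hc : pvMinFold (p :: ps) n = min n (List.idxOf p resourceKeywords) := h
      rcases Nat.le_total n (List.idxOf p resourceKeywords) with hle | hle
      · left; rw [hc, Nat.min_eq_left hle]
      · right; exact ⟨p, List.mem_cons_self, by rw [hc, Nat.min_eq_right hle]⟩
    · right
      exact ⟨q, List.mem_cons_of_mem _ hq,
        show pvMinFold (p :: ps) n = List.idxOf q resourceKeywords from hfq⟩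

theorem pvMinFold_le_idxOf (parts : List String) :
    ∀ n, ∀ p ∈ parts, pvMinFold parts n ≤ List.idxOf p resourceKeywords := by
  induction parts with
  | nil => intro n p hp; cases hp
  | cons q qs ih =>
    intro n p hp
    rcases List.mem_cons.mp hp with h | h
    · subst h
      calc pvMinFold (p :: qs) n
          = pvMinFold qs (min n (List.idxOf p resourceKeywords)) := rfl
        _ ≤ min n (List.idxOf p resourceKeywords) := pvMinFold_le _ _
        _ ≤ List.idxOf p resourceKeywords := Nat.min_le_right _ _
    · exact ih _ p h

-- B's fold keeps the (rank, keyword) pair of minimal rank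
theorem b_fold_char (parts : List String) :
    ∀ (n : Nat) (a : Option (Int × String)),
      n ≤ resourceKeywords.length →
      (a = if h : n < resourceKeywords.length then some ((n : Int), resourceKeywords[n]) else none) →
      parts.foldl
        (fun best part =>
          match pvRank.get? part with
          | some r =>
            match best with
            | none => some (r, part)
            | some b => if r < b.1 then some (r, part) else best
          | none => best)
        a
      = (if h : pvMinFold parts n < resourceKeywords.length
         then some ((pvMinFold parts n : Int), resourceKeywords[pvMinFold parts n]) else none) := by
  induction parts with
  | nil => intro n a hn ha; simpa [pvMinFold] using ha
  | cons p ps ih =>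
    intro n a hn ha
    subst ha
    have hstep : pvMinFold (p :: ps) n = pvMinFold ps (min n (List.idxOf p resourceKeywords)) := rfl
    rw [List.foldl_cons, hstep, pvRank_get? p]
    by_cases hp : p ∈ resourceKeywords
    · rw [if_pos hp]
      have hidx : List.idxOf p resourceKeywords < resourceKeywords.length :=
        List.idxOf_lt_length_iff.mpr hp
      by_cases hlt : List.idxOf p resourceKeywords < n
      · have hmin : min n (List.idxOf p resourceKeywords) = List.idxOf p resourceKeywords :=
          Nat.min_eq_right (Nat.le_of_lt hlt)
        rw [hmin]
        by_cases h : n < resourceKeywords.length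
        · rw [dif_pos h]
          dsimp only
          rw [if_pos (by exact_mod_cast hlt : (List.idxOf p resourceKeywords : Int) < (n : Int))]
          exact ih _ _ (Nat.le_of_lt hidx)
            (by rw [dif_pos hidx, List.getElem_idxOf hidx])
        · rw [dif_neg h]
          dsimp only
          exact ih _ _ (Nat.le_of_lt hidx)
            (by rw [dif_pos hidx, List.getElem_idxOf hidx])
      · have hge : n ≤ List.idxOf p resourceKeywords := Nat.le_of_not_lt hlt
        have hmin : min n (List.idxOf p resourceKeywords) = n := Nat.min_eq_left hge
        have hn' : n < resourceKeywords.length := Nat.lt_of_le_of_lt hge hidx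
        rw [hmin, dif_pos hn']
        dsimp only
        rw [if_neg (by exact_mod_cast hlt : ¬ (List.idxOf p resourceKeywords : Int) < (n : Int))]
        exact ih n _ hn (by rw [dif_pos hn'])
    · rw [if_neg hp]
      have hidxe : List.idxOf p resourceKeywords = resourceKeywords.length :=
        List.idxOf_eq_length hp
      have hmin : min n (List.idxOf p resourceKeywords) = n := by omega
      rw [hmin]
      dsimp only
      exact ih _ _ hn rfl

-- find? returns the element at the first index where the predicate holds
theorem find?_eq_getElem_of_first {α : Type} (l : List α) (pred : α → Bool) :
    ∀ (i : Nat) (h : i < l.length), pred l[i] = true →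
      (∀ j (hj : j < i), pred (l[j]'(Nat.lt_trans hj h)) = false) →
      l.find? pred = some l[i] := by
  induction l with
  | nil => intro i h; cases h
  | cons x xs ih =>
    intro i h hpi hbefore
    cases i with
    | zero => simp only [List.getElem_cons_zero] at hpi ⊢; simp [hpi]
    | succ i =>
      have h0 : pred x = false := by
        have := hbefore 0 (Nat.succ_pos i)
        simpa using this
      simp only [List.getElem_cons_succ] at hpi ⊢
      rw [List.find?_cons, h0]
      exact ih i (Nat.lt_of_succ_lt_succ h) hpi
        (fun j hj => by
          have := hbefore (j + 1) (Nat.succ_lt_succ hj)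
          simpa using this)

-- A's priority scan also returns the keyword of minimal rank
theorem a_find_char (parts : List String) :
    resourceKeywords.find? (fun keyword => parts.contains keyword)
      = (if h : pvMinFold parts resourceKeywords.length < resourceKeywords.length
         then some resourceKeywords[pvMinFold parts resourceKeywords.length] else none) := by
  by_cases h : pvMinFold parts resourceKeywords.length < resourceKeywords.length
  · rw [dif_pos h]
    have hmem : (resourceKeywords[pvMinFold parts resourceKeywords.length]'h) ∈ parts := by
      rcases pvMinFold_attained parts resourceKeywords.length with heq | ⟨p, hp, hfp⟩
      · omega
      · have hidx : List.idxOf p resourceKeywords < resourceKeywords.length := by omega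
        have hget : (resourceKeywords[pvMinFold parts resourceKeywords.length]'h) = p := by
          simp only [hfp]
          exact List.getElem_idxOf hidx
        rw [hget]; exact hp
    apply find?_eq_getElem_of_first _ _ _ h
    · simpa using hmem
    · intro j hj
      by_contra hcon
      have hmemj : (resourceKeywords[j]'(Nat.lt_trans hj h)) ∈ parts := by
        simpa using hcon
      have hle := pvMinFold_le_idxOf parts resourceKeywords.length _ hmemj
      rw [resourceKeywords_nodup.idxOf_getElem j (Nat.lt_trans hj h)] at hle
      omega
  · rw [dif_neg h]
    rw [List.find?_eq_none]
    intro k hk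
    simp only [Bool.not_eq_true, List.contains_eq_mem, decide_eq_false_iff_not]
    intro hkp
    have hle := pvMinFold_le_idxOf parts resourceKeywords.length k hkp
    have hidx : List.idxOf k resourceKeywords < resourceKeywords.length :=
      List.idxOf_lt_length_iff.mpr hk
    omega

-- ===== VERDICT (by name: the statement is the Claim_ definition above) =====
theorem extract_actual_resource_from_assertion_spec : Claim_equal_extract_actual_resource_from_assertion := by
  intro s _
  unfold Spec_extract_actual_resource_from_assertion
  unfold extract_actual_resource_from_assertion extract_actual_resource_from_assertion_alt
  cases hsp : PySem.Str.split? (PySem.Str.lower s) "_" with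
  | none => rfl
  | some parts =>
    dsimp only
    rw [b_fold_char parts resourceKeywords.length none (Nat.le_refl _)
        (by rw [dif_neg (Nat.lt_irrefl _)]),
      a_find_char parts]
    by_cases h : pvMinFold parts resourceKeywords.length < resourceKeywords.length
    · rw [dif_pos h, dif_pos h]
    · rw [dif_neg h, dif_neg h]
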